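-- pv_equiv track=rewrite | github.com/AtlantixJJ/LinearGAN | figure/methods_compare.py | formal_name
-- ===== SOURCE A (Python) =====
-- def formal_name(name):
--   if type(name) is list:
--     return [formal_name(n) for n in name]
--   finds = ["stylegan", "pggan", "bedroom", "church", "celebahq", "ffhq"]
--   subs = ["StyleGAN", "PGGAN", "Bedroom", "Church", "CelebAHQ", "FFHQ"]
--   for find, sub in zip(finds, subs):
--     name = name.replace(find, sub)
--   return name
-- ===== SOURCE B (Python) =====
-- def formal_name(name):
--   if type(name) is list:
--     return [formal_name(n) for n in name]
--   table = {"stylegan": "StyleGAN", "pggan": "PGGAN", "bedroom": "Bedroom",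
--            "church": "Church", "celebahq": "CelebAHQ", "ffhq": "FFHQ"}
--   out = []
--   i = 0
--   n = len(name)
--   while i < n:
--     for k, v in table.items():
--       if name.startswith(k, i):
--         out.append(v)
--         i += len(k)
--         break
--     else:
--       out.append(name[i])
--       i += 1
--   return "".join(out)
-- ===== Notes on version B (the rewrite author's own statement) =====
-- stated objective: alternative
-- what changed: A runs six sequential full-string .replace passes (rebuilding the string each time); B makes a single left-to-right scan, at each position trying the six keywords against a lookup table and emitting the formal name (or the character) once - one pass, equivalent because the keywords never overlap and no formal name re-triggers a keyword.
import Mathlib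
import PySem

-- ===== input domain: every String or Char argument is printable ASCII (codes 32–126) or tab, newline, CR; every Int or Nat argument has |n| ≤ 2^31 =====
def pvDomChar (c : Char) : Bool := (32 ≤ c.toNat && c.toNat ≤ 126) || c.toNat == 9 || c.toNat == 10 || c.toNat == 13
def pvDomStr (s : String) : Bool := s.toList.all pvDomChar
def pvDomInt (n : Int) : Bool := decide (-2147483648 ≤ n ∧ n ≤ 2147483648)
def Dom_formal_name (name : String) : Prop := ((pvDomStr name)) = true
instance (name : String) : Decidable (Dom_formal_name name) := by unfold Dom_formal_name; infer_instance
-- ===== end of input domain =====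

set_option maxRecDepth 4000

-- B replaces A's six sequential full-string .replace passes by one left-to-right scan with a
-- first-match table lookup at each position (objective: alternative — same result, one pass).
-- (A's `type(name) is list` branch is unreachable under the String signature and is not ported.)

-- ===== PORT A =====
def formal_name (name : String) : String :=
  let finds : List String := ["stylegan", "pggan", "bedroom", "church", "celebahq", "ffhq"]
  let subs : List String := ["StyleGAN", "PGGAN", "Bedroom", "Church", "CelebAHQ", "FFHQ"]
  (List.zip finds subs).foldl (fun name fs => PySem.Str.replace name fs.1 fs.2) name

-- ===== PORT B =====
-- Source B's table (dict in insertion order)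
def pvTable : List (List Char × List Char) :=
  [("stylegan".toList, "StyleGAN".toList), ("pggan".toList, "PGGAN".toList),
   ("bedroom".toList, "Bedroom".toList), ("church".toList, "Church".toList),
   ("celebahq".toList, "CelebAHQ".toList), ("ffhq".toList, "FFHQ".toList)]

-- Source B's while loop: at position i try the table entries in order (name.startswith(k, i));
-- on the first hit emit the formal name and jump len(k), otherwise copy one character.
def pvScan : List Char → List Char
  | [] => []
  | c :: t =>
    match pvTable.find? (fun p => p.1.isPrefixOf (c :: t)) with
    | some p => p.2 ++ pvScan (List.drop (p.1.length - 1) t)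
    | none => c :: pvScan t
  termination_by cs => cs.length
  decreasing_by all_goals (simp; try omega)

def formal_name_alt (name : String) : String := String.ofList (pvScan name.toList)

-- ===== PRECONDITION & SPEC =====
def Spec_formal_name (name : String) (out : String) : Prop := out = formal_name_alt name
instance (name : String) (out : String) : Decidable (Spec_formal_name name out) := by unfold Spec_formal_name; infer_instance

-- ===== CLAIM (what is proved, stated in full; the proofs are below) =====
def Claim_equal_formal_name : Prop := ∀ (name : String), Dom_formal_name name → Spec_formal_name name (formal_name name)

-- ===== LEMMAS AND PROOFS =====

-- Clean recursion computing Python's s.replace(old, new) for old ≠ "" (left-to-right, non-overlapping).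
def pvRep (old new : List Char) : List Char → List Char
  | [] => []
  | c :: t =>
    if old.isPrefixOf (c :: t) then new ++ pvRep old new (List.drop (old.length - 1) t)
    else c :: pvRep old new t
  termination_by l => l.length
  decreasing_by all_goals (simp; try omega)

lemma pvRep_nil (old new : List Char) : pvRep old new [] = [] := by rw [pvRep]

lemma pvRep_cons (old new : List Char) (c : Char) (t : List Char) :
    pvRep old new (c :: t) =
      if old.isPrefixOf (c :: t) then new ++ pvRep old new (List.drop (old.length - 1) t)
      else c :: pvRep old new t := by rw [pvRep]

lemma pvRep_match (old new : List Char) (hne : old ≠ []) (t : List Char) :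
    pvRep old new (old ++ t) = new ++ pvRep old new t := by
  obtain ⟨d, old', rfl⟩ := List.exists_cons_of_ne_nil hne
  rw [List.cons_append, pvRep_cons, if_pos (List.isPrefixOf_iff_prefix.mpr ⟨t, by simp⟩)]
  simp

lemma pvRep_nomatch (old new : List Char) (c : Char) (t : List Char) (h : ¬ old <+: (c :: t)) :
    pvRep old new (c :: t) = c :: pvRep old new t := by
  rw [pvRep_cons, if_neg (by simpa [List.isPrefixOf_iff_prefix] using h)]

lemma pv_no_prefix_append {a b : List Char} (h1 : ¬ a <+: b) (h2 : ¬ b <+: a) (t : List Char) :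
    ¬ a <+: (b ++ t) := by
  intro h
  by_cases hl : a.length ≤ b.length
  · exact h1 (List.prefix_of_prefix_length_le h (List.prefix_append _ _) hl)
  · exact h2 (List.prefix_of_prefix_length_le (List.prefix_append _ _) h (by omega))

-- pvRep old new commutes past a block x in which old can match at no position (not even straddling).
lemma pv_passthrough (old new : List Char) :
    ∀ (x : List Char), (∀ y ∈ x.tails, y ≠ [] → ¬ old <+: y ∧ ¬ y <+: old) →
      ∀ t, pvRep old new (x ++ t) = x ++ pvRep old new t := by
  intro x
  induction x with
  | nil => intro _ t; simp
  | cons c x' ih =>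
    intro H t
    have hy := H (c :: x') (by simp [List.mem_tails]) (by simp)
    have hno : ¬ old <+: c :: (x' ++ t) := pv_no_prefix_append hy.1 hy.2 t
    rw [List.cons_append, pvRep_nomatch _ _ _ _ hno,
        ih (fun y hme hne => H y (by
          rw [List.mem_tails] at hme ⊢
          exact hme.trans (List.suffix_cons c x')) hne) t]
    simp

-- an all-lowercase w can only be a prefix of pvRep old (d :: new') s (d not lowercase)
-- if it already was a prefix of s
lemma pv_reflect (old : List Char) (d : Char) (new' : List Char)
    (hd : d.isLower = false) :
    ∀ (s w : List Char), w.all Char.isLower = true →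
      w <+: pvRep old (d :: new') s → w <+: s := by
  intro s
  induction hn : s.length using Nat.strong_induction_on generalizing s with
  | _ n ih =>
    cases s with
    | nil =>
      intro w _ hw
      rw [pvRep_nil] at hw
      simpa using hw
    | cons c t =>
      intro w hlow hw
      rw [pvRep_cons] at hw
      by_cases hp : old.isPrefixOf (c :: t)
      · rw [if_pos hp] at hw
        cases w with
        | nil => exact List.nil_prefix
        | cons a w' =>
          rw [List.cons_append, List.cons_prefix_cons] at hw
          rw [List.all_cons, Bool.and_eq_true] at hlow
          rw [hw.1] at hlow
          simp [hd] at hlow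
      · rw [if_neg hp] at hw
        cases w with
        | nil => exact List.nil_prefix
        | cons a w' =>
          rw [List.all_cons, Bool.and_eq_true] at hlow
          rw [List.cons_prefix_cons] at hw ⊢
          refine ⟨hw.1, ?_⟩
          subst hn
          exact ih t.length (by simp) t rfl w' hlow.2 hw.2

-- A's six sequential replaces, as one function on char lists
def pvComp (cs : List Char) : List Char :=
  pvRep "ffhq".toList "FFHQ".toList (pvRep "celebahq".toList "CelebAHQ".toList
    (pvRep "church".toList "Church".toList (pvRep "bedroom".toList "Bedroom".toList
      (pvRep "pggan".toList "PGGAN".toList (pvRep "stylegan".toList "StyleGAN".toList cs)))))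

lemma pv_go_eq (old new : List Char) (hne : old ≠ []) :
    ∀ (fuel : Nat) (l acc : List Char), l.length ≤ fuel →
      PySem.Chars.replace.go old new fuel l acc = acc.reverse ++ pvRep old new l := by
  intro fuel
  induction fuel with
  | zero =>
    intro l acc h
    have : l = [] := by cases l <;> simp_all
    subst this
    rw [PySem.Chars.replace.go.eq_def]
    simp [pvRep_nil]
  | succ fuel ih =>
    intro l acc h
    cases l with
    | nil =>
      rw [PySem.Chars.replace.go.eq_def]
      simp [pvRep_nil]
    | cons c t =>
      obtain ⟨d, old', rfl⟩ := List.exists_cons_of_ne_nil hne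
      rw [PySem.Chars.replace.go.eq_def]
      by_cases hp : (d :: old').isPrefixOf (c :: t)
      · simp only [hp, if_true]
        rw [ih _ _ (by simp at h ⊢; omega), pvRep_cons, if_pos hp]
        simp
      · simp only [hp]
        rw [ih t (c :: acc) (by simp at h ⊢; omega), pvRep_cons, if_neg hp]
        simp

lemma pv_replace_eq (s old new : List Char) (hne : old ≠ []) :
    PySem.Chars.replace s old new = pvRep old new s := by
  rw [PySem.Chars.replace, if_neg (by simpa [List.isEmpty_iff] using hne),
      pv_go_eq old new hne s.length s [] le_rfl]
  simp

lemma pv_formal_name_toList (name : String) :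
    (formal_name name).toList = pvComp name.toList := by
  simp only [formal_name, List.zip, List.zipWith, List.foldl, PySem.Str.toList_replace]
  rw [pv_replace_eq _ _ _ (by decide), pv_replace_eq _ _ _ (by decide),
      pv_replace_eq _ _ _ (by decide), pv_replace_eq _ _ _ (by decide),
      pv_replace_eq _ _ _ (by decide), pv_replace_eq _ _ _ (by decide)]
  rfl

-- comp on a string starting with a keyword: the keyword is rewritten and the tail processed
lemma pvComp_stylegan (t : List Char) :
    pvComp ("stylegan".toList ++ t) = "StyleGAN".toList ++ pvComp t := by
  unfold pvComp
  rw [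
      pvRep_match "stylegan".toList "StyleGAN".toList (by decide),
      pv_passthrough "pggan".toList "PGGAN".toList "StyleGAN".toList (by decide),
      pv_passthrough "bedroom".toList "Bedroom".toList "StyleGAN".toList (by decide),
      pv_passthrough "church".toList "Church".toList "StyleGAN".toList (by decide),
      pv_passthrough "celebahq".toList "CelebAHQ".toList "StyleGAN".toList (by decide),
      pv_passthrough "ffhq".toList "FFHQ".toList "StyleGAN".toList (by decide)]

lemma pvComp_pggan (t : List Char) :
    pvComp ("pggan".toList ++ t) = "PGGAN".toList ++ pvComp t := by
  unfold pvComp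
  rw [
      pv_passthrough "stylegan".toList "StyleGAN".toList "pggan".toList (by decide),
      pvRep_match "pggan".toList "PGGAN".toList (by decide),
      pv_passthrough "bedroom".toList "Bedroom".toList "PGGAN".toList (by decide),
      pv_passthrough "church".toList "Church".toList "PGGAN".toList (by decide),
      pv_passthrough "celebahq".toList "CelebAHQ".toList "PGGAN".toList (by decide),
      pv_passthrough "ffhq".toList "FFHQ".toList "PGGAN".toList (by decide)]

lemma pvComp_bedroom (t : List Char) :
    pvComp ("bedroom".toList ++ t) = "Bedroom".toList ++ pvComp t := by
  unfold pvComp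
  rw [
      pv_passthrough "stylegan".toList "StyleGAN".toList "bedroom".toList (by decide),
      pv_passthrough "pggan".toList "PGGAN".toList "bedroom".toList (by decide),
      pvRep_match "bedroom".toList "Bedroom".toList (by decide),
      pv_passthrough "church".toList "Church".toList "Bedroom".toList (by decide),
      pv_passthrough "celebahq".toList "CelebAHQ".toList "Bedroom".toList (by decide),
      pv_passthrough "ffhq".toList "FFHQ".toList "Bedroom".toList (by decide)]

lemma pvComp_church (t : List Char) :
    pvComp ("church".toList ++ t) = "Church".toList ++ pvComp t := by
  unfold pvComp
  rw [
      pv_passthrough "stylegan".toList "StyleGAN".toList "church".toList (by decide),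
      pv_passthrough "pggan".toList "PGGAN".toList "church".toList (by decide),
      pv_passthrough "bedroom".toList "Bedroom".toList "church".toList (by decide),
      pvRep_match "church".toList "Church".toList (by decide),
      pv_passthrough "celebahq".toList "CelebAHQ".toList "Church".toList (by decide),
      pv_passthrough "ffhq".toList "FFHQ".toList "Church".toList (by decide)]

lemma pvComp_celebahq (t : List Char) :
    pvComp ("celebahq".toList ++ t) = "CelebAHQ".toList ++ pvComp t := by
  unfold pvComp
  rw [
      pv_passthrough "stylegan".toList "StyleGAN".toList "celebahq".toList (by decide),
      pv_passthrough "pggan".toList "PGGAN".toList "celebahq".toList (by decide),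
      pv_passthrough "bedroom".toList "Bedroom".toList "celebahq".toList (by decide),
      pv_passthrough "church".toList "Church".toList "celebahq".toList (by decide),
      pvRep_match "celebahq".toList "CelebAHQ".toList (by decide),
      pv_passthrough "ffhq".toList "FFHQ".toList "CelebAHQ".toList (by decide)]

lemma pvComp_ffhq (t : List Char) :
    pvComp ("ffhq".toList ++ t) = "FFHQ".toList ++ pvComp t := by
  unfold pvComp
  rw [
      pv_passthrough "stylegan".toList "StyleGAN".toList "ffhq".toList (by decide),
      pv_passthrough "pggan".toList "PGGAN".toList "ffhq".toList (by decide),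
      pv_passthrough "bedroom".toList "Bedroom".toList "ffhq".toList (by decide),
      pv_passthrough "church".toList "Church".toList "ffhq".toList (by decide),
      pv_passthrough "celebahq".toList "CelebAHQ".toList "ffhq".toList (by decide),
      pvRep_match "ffhq".toList "FFHQ".toList (by decide)]

-- comp on a string no keyword is a prefix of: the first char passes through unchanged
lemma pvComp_cons (c : Char) (t : List Char)
    (h1 : ¬ "stylegan".toList <+: (c :: t)) (h2 : ¬ "pggan".toList <+: (c :: t))
    (h3 : ¬ "bedroom".toList <+: (c :: t)) (h4 : ¬ "church".toList <+: (c :: t))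
    (h5 : ¬ "celebahq".toList <+: (c :: t)) (h6 : ¬ "ffhq".toList <+: (c :: t)) :
    pvComp (c :: t) = c :: pvComp t := by
  have e1 := pvRep_nomatch "stylegan".toList "StyleGAN".toList c t h1
  have n2 : ¬ "pggan".toList <+: (c :: pvRep "stylegan".toList "StyleGAN".toList t) := by
    intro hp
    rw [← e1] at hp
    exact h2 (pv_reflect "stylegan".toList 'S' "tyleGAN".toList (by decide) _ "pggan".toList (by decide)
      (hp))
  have n3 : ¬ "bedroom".toList <+: (c :: pvRep "pggan".toList "PGGAN".toList (pvRep "stylegan".toList "StyleGAN".toList t)) := by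
    intro hp
    rw [← pvRep_nomatch _ _ _ _ n2, ← e1] at hp
    exact h3 (pv_reflect "stylegan".toList 'S' "tyleGAN".toList (by decide) _ "bedroom".toList (by decide)
      (pv_reflect "pggan".toList 'P' "GGAN".toList (by decide) _ "bedroom".toList (by decide)
      (hp)))
  have n4 : ¬ "church".toList <+: (c :: pvRep "bedroom".toList "Bedroom".toList (pvRep "pggan".toList "PGGAN".toList (pvRep "stylegan".toList "StyleGAN".toList t))) := by
    intro hp
    rw [← pvRep_nomatch _ _ _ _ n3, ← pvRep_nomatch _ _ _ _ n2, ← e1] at hp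
    exact h4 (pv_reflect "stylegan".toList 'S' "tyleGAN".toList (by decide) _ "church".toList (by decide)
      (pv_reflect "pggan".toList 'P' "GGAN".toList (by decide) _ "church".toList (by decide)
      (pv_reflect "bedroom".toList 'B' "edroom".toList (by decide) _ "church".toList (by decide)
      (hp))))
  have n5 : ¬ "celebahq".toList <+: (c :: pvRep "church".toList "Church".toList (pvRep "bedroom".toList "Bedroom".toList (pvRep "pggan".toList "PGGAN".toList (pvRep "stylegan".toList "StyleGAN".toList t)))) := by
    intro hp
    rw [← pvRep_nomatch _ _ _ _ n4, ← pvRep_nomatch _ _ _ _ n3, ← pvRep_nomatch _ _ _ _ n2, ← e1] at hp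
    exact h5 (pv_reflect "stylegan".toList 'S' "tyleGAN".toList (by decide) _ "celebahq".toList (by decide)
      (pv_reflect "pggan".toList 'P' "GGAN".toList (by decide) _ "celebahq".toList (by decide)
      (pv_reflect "bedroom".toList 'B' "edroom".toList (by decide) _ "celebahq".toList (by decide)
      (pv_reflect "church".toList 'C' "hurch".toList (by decide) _ "celebahq".toList (by decide)
      (hp)))))
  have n6 : ¬ "ffhq".toList <+: (c :: pvRep "celebahq".toList "CelebAHQ".toList (pvRep "church".toList "Church".toList (pvRep "bedroom".toList "Bedroom".toList (pvRep "pggan".toList "PGGAN".toList (pvRep "stylegan".toList "StyleGAN".toList t))))) := by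
    intro hp
    rw [← pvRep_nomatch _ _ _ _ n5, ← pvRep_nomatch _ _ _ _ n4, ← pvRep_nomatch _ _ _ _ n3, ← pvRep_nomatch _ _ _ _ n2, ← e1] at hp
    exact h6 (pv_reflect "stylegan".toList 'S' "tyleGAN".toList (by decide) _ "ffhq".toList (by decide)
      (pv_reflect "pggan".toList 'P' "GGAN".toList (by decide) _ "ffhq".toList (by decide)
      (pv_reflect "bedroom".toList 'B' "edroom".toList (by decide) _ "ffhq".toList (by decide)
      (pv_reflect "church".toList 'C' "hurch".toList (by decide) _ "ffhq".toList (by decide)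
      (pv_reflect "celebahq".toList 'C' "elebAHQ".toList (by decide) _ "ffhq".toList (by decide)
      (hp))))))
  unfold pvComp
  rw [e1, pvRep_nomatch _ _ _ _ n2, pvRep_nomatch _ _ _ _ n3, pvRep_nomatch _ _ _ _ n4,
      pvRep_nomatch _ _ _ _ n5, pvRep_nomatch _ _ _ _ n6]

-- scan on a string starting with / not starting with a keyword
lemma pvScan_nil : pvScan [] = [] := by rw [pvScan]

lemma pvScan_cons_none (c : Char) (t : List Char)
    (h : ∀ p ∈ pvTable, ¬ p.1 <+: (c :: t)) : pvScan (c :: t) = c :: pvScan t := by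
  rw [pvScan]
  have : pvTable.find? (fun p => p.1.isPrefixOf (c :: t)) = none := by
    rw [List.find?_eq_none]
    intro p hp
    simpa [List.isPrefixOf_iff_prefix] using h p hp
  rw [this]

lemma pvScan_stylegan (t : List Char) :
    pvScan ("stylegan".toList ++ t) = "StyleGAN".toList ++ pvScan t := by
  rw [show ("stylegan".toList : List Char) = 's' :: "tylegan".toList from rfl, List.cons_append,
      pvScan]
  have hf : pvTable.find? (fun p => p.1.isPrefixOf ('s' :: ("tylegan".toList ++ t))) =
      some ("stylegan".toList, "StyleGAN".toList) := by
    simp only [pvTable, List.find?]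
    rw [show ("stylegan".toList : List Char).isPrefixOf ('s' :: ("tylegan".toList ++ t)) = true
      from List.isPrefixOf_iff_prefix.mpr ⟨t, by simp⟩]
  rw [hf]
  simp

lemma pvScan_pggan (t : List Char) :
    pvScan ("pggan".toList ++ t) = "PGGAN".toList ++ pvScan t := by
  rw [show ("pggan".toList : List Char) = 'p' :: "ggan".toList from rfl, List.cons_append, pvScan]
  have hf : pvTable.find? (fun p => p.1.isPrefixOf ('p' :: ("ggan".toList ++ t))) =
      some ("pggan".toList, "PGGAN".toList) := by
    simp only [pvTable, List.find?]
    rw [show ("stylegan".toList : List Char).isPrefixOf ('p' :: ("ggan".toList ++ t)) = false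
      from by
        simp only [Bool.eq_false_iff, ne_eq, List.isPrefixOf_iff_prefix]
        exact pv_no_prefix_append (a := "stylegan".toList) (b := "pggan".toList)
          (by decide) (by decide) t]
    rw [show ("pggan".toList : List Char).isPrefixOf ('p' :: ("ggan".toList ++ t)) = true
      from List.isPrefixOf_iff_prefix.mpr ⟨t, by simp⟩]
  rw [hf]
  simp

lemma pvScan_bedroom (t : List Char) :
    pvScan ("bedroom".toList ++ t) = "Bedroom".toList ++ pvScan t := by
  rw [show ("bedroom".toList : List Char) = 'b' :: "edroom".toList from rfl, List.cons_append,
      pvScan]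
  have hf : pvTable.find? (fun p => p.1.isPrefixOf ('b' :: ("edroom".toList ++ t))) =
      some ("bedroom".toList, "Bedroom".toList) := by
    simp only [pvTable, List.find?]
    rw [show ("stylegan".toList : List Char).isPrefixOf ('b' :: ("edroom".toList ++ t)) = false
      from by
        simp only [Bool.eq_false_iff, ne_eq, List.isPrefixOf_iff_prefix]
        exact pv_no_prefix_append (b := "bedroom".toList) (by decide) (by decide) t]
    rw [show ("pggan".toList : List Char).isPrefixOf ('b' :: ("edroom".toList ++ t)) = false
      from by
        simp only [Bool.eq_false_iff, ne_eq, List.isPrefixOf_iff_prefix]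
        exact pv_no_prefix_append (b := "bedroom".toList) (by decide) (by decide) t]
    rw [show ("bedroom".toList : List Char).isPrefixOf ('b' :: ("edroom".toList ++ t)) = true
      from List.isPrefixOf_iff_prefix.mpr ⟨t, by simp⟩]
  rw [hf]
  simp

lemma pvScan_church (t : List Char) :
    pvScan ("church".toList ++ t) = "Church".toList ++ pvScan t := by
  rw [show ("church".toList : List Char) = 'c' :: "hurch".toList from rfl, List.cons_append,
      pvScan]
  have hf : pvTable.find? (fun p => p.1.isPrefixOf ('c' :: ("hurch".toList ++ t))) =
      some ("church".toList, "Church".toList) := by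
    simp only [pvTable, List.find?]
    rw [show ("stylegan".toList : List Char).isPrefixOf ('c' :: ("hurch".toList ++ t)) = false
      from by
        simp only [Bool.eq_false_iff, ne_eq, List.isPrefixOf_iff_prefix]
        exact pv_no_prefix_append (b := "church".toList) (by decide) (by decide) t]
    rw [show ("pggan".toList : List Char).isPrefixOf ('c' :: ("hurch".toList ++ t)) = false
      from by
        simp only [Bool.eq_false_iff, ne_eq, List.isPrefixOf_iff_prefix]
        exact pv_no_prefix_append (b := "church".toList) (by decide) (by decide) t]
    rw [show ("bedroom".toList : List Char).isPrefixOf ('c' :: ("hurch".toList ++ t)) = false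
      from by
        simp only [Bool.eq_false_iff, ne_eq, List.isPrefixOf_iff_prefix]
        exact pv_no_prefix_append (b := "church".toList) (by decide) (by decide) t]
    rw [show ("church".toList : List Char).isPrefixOf ('c' :: ("hurch".toList ++ t)) = true
      from List.isPrefixOf_iff_prefix.mpr ⟨t, by simp⟩]
  rw [hf]
  simp

lemma pvScan_celebahq (t : List Char) :
    pvScan ("celebahq".toList ++ t) = "CelebAHQ".toList ++ pvScan t := by
  rw [show ("celebahq".toList : List Char) = 'c' :: "elebahq".toList from rfl, List.cons_append,
      pvScan]
  have hf : pvTable.find? (fun p => p.1.isPrefixOf ('c' :: ("elebahq".toList ++ t))) =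
      some ("celebahq".toList, "CelebAHQ".toList) := by
    simp only [pvTable, List.find?]
    rw [show ("stylegan".toList : List Char).isPrefixOf ('c' :: ("elebahq".toList ++ t)) = false
      from by
        simp only [Bool.eq_false_iff, ne_eq, List.isPrefixOf_iff_prefix]
        exact pv_no_prefix_append (b := "celebahq".toList) (by decide) (by decide) t]
    rw [show ("pggan".toList : List Char).isPrefixOf ('c' :: ("elebahq".toList ++ t)) = false
      from by
        simp only [Bool.eq_false_iff, ne_eq, List.isPrefixOf_iff_prefix]
        exact pv_no_prefix_append (b := "celebahq".toList) (by decide) (by decide) t]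
    rw [show ("bedroom".toList : List Char).isPrefixOf ('c' :: ("elebahq".toList ++ t)) = false
      from by
        simp only [Bool.eq_false_iff, ne_eq, List.isPrefixOf_iff_prefix]
        exact pv_no_prefix_append (b := "celebahq".toList) (by decide) (by decide) t]
    rw [show ("church".toList : List Char).isPrefixOf ('c' :: ("elebahq".toList ++ t)) = false
      from by
        simp only [Bool.eq_false_iff, ne_eq, List.isPrefixOf_iff_prefix]
        exact pv_no_prefix_append (b := "celebahq".toList) (by decide) (by decide) t]
    rw [show ("celebahq".toList : List Char).isPrefixOf ('c' :: ("elebahq".toList ++ t)) = true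
      from List.isPrefixOf_iff_prefix.mpr ⟨t, by simp⟩]
  rw [hf]
  simp

lemma pvScan_ffhq (t : List Char) :
    pvScan ("ffhq".toList ++ t) = "FFHQ".toList ++ pvScan t := by
  rw [show ("ffhq".toList : List Char) = 'f' :: "fhq".toList from rfl, List.cons_append, pvScan]
  have hf : pvTable.find? (fun p => p.1.isPrefixOf ('f' :: ("fhq".toList ++ t))) =
      some ("ffhq".toList, "FFHQ".toList) := by
    simp only [pvTable, List.find?]
    rw [show ("stylegan".toList : List Char).isPrefixOf ('f' :: ("fhq".toList ++ t)) = false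
      from by
        simp only [Bool.eq_false_iff, ne_eq, List.isPrefixOf_iff_prefix]
        exact pv_no_prefix_append (b := "ffhq".toList) (by decide) (by decide) t]
    rw [show ("pggan".toList : List Char).isPrefixOf ('f' :: ("fhq".toList ++ t)) = false
      from by
        simp only [Bool.eq_false_iff, ne_eq, List.isPrefixOf_iff_prefix]
        exact pv_no_prefix_append (b := "ffhq".toList) (by decide) (by decide) t]
    rw [show ("bedroom".toList : List Char).isPrefixOf ('f' :: ("fhq".toList ++ t)) = false
      from by
        simp only [Bool.eq_false_iff, ne_eq, List.isPrefixOf_iff_prefix]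
        exact pv_no_prefix_append (b := "ffhq".toList) (by decide) (by decide) t]
    rw [show ("church".toList : List Char).isPrefixOf ('f' :: ("fhq".toList ++ t)) = false
      from by
        simp only [Bool.eq_false_iff, ne_eq, List.isPrefixOf_iff_prefix]
        exact pv_no_prefix_append (b := "ffhq".toList) (by decide) (by decide) t]
    rw [show ("celebahq".toList : List Char).isPrefixOf ('f' :: ("fhq".toList ++ t)) = false
      from by
        simp only [Bool.eq_false_iff, ne_eq, List.isPrefixOf_iff_prefix]
        exact pv_no_prefix_append (b := "ffhq".toList) (by decide) (by decide) t]
    rw [show ("ffhq".toList : List Char).isPrefixOf ('f' :: ("fhq".toList ++ t)) = true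
      from List.isPrefixOf_iff_prefix.mpr ⟨t, by simp⟩]
  rw [hf]
  simp

lemma pvComp_eq_scan : ∀ cs : List Char, pvComp cs = pvScan cs := by
  have main : ∀ (n : Nat) (cs : List Char), cs.length ≤ n → pvComp cs = pvScan cs := by
    intro n
    induction n with
    | zero =>
      intro cs h
      have : cs = [] := by cases cs <;> simp_all
      subst this
      unfold pvComp
      simp [pvRep_nil, pvScan_nil]
    | succ n ih =>
      intro cs hlen
      by_cases h1 : "stylegan".toList <+: cs
      · obtain ⟨t, rfl⟩ := h1
        rw [pvComp_stylegan, pvScan_stylegan, ih t (by simp at hlen; omega)]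
      by_cases h2 : "pggan".toList <+: cs
      · obtain ⟨t, rfl⟩ := h2
        rw [pvComp_pggan, pvScan_pggan, ih t (by simp at hlen; omega)]
      by_cases h3 : "bedroom".toList <+: cs
      · obtain ⟨t, rfl⟩ := h3
        rw [pvComp_bedroom, pvScan_bedroom, ih t (by simp at hlen; omega)]
      by_cases h4 : "church".toList <+: cs
      · obtain ⟨t, rfl⟩ := h4
        rw [pvComp_church, pvScan_church, ih t (by simp at hlen; omega)]
      by_cases h5 : "celebahq".toList <+: cs
      · obtain ⟨t, rfl⟩ := h5
        rw [pvComp_celebahq, pvScan_celebahq, ih t (by simp at hlen; omega)]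
      by_cases h6 : "ffhq".toList <+: cs
      · obtain ⟨t, rfl⟩ := h6
        rw [pvComp_ffhq, pvScan_ffhq, ih t (by simp at hlen; omega)]
      cases cs with
      | nil =>
        unfold pvComp
        simp [pvRep_nil, pvScan_nil]
      | cons c t =>
        rw [pvComp_cons c t h1 h2 h3 h4 h5 h6,
            pvScan_cons_none c t (by
              intro p hp
              simp only [pvTable, List.mem_cons, List.not_mem_nil, or_false] at hp
              rcases hp with rfl | rfl | rfl | rfl | rfl | rfl <;> assumption),
            ih t (by simp at hlen; omega)]
  exact fun cs => main cs.length cs le_rfl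

-- ===== VERDICT (by name: the statement is the Claim_ definition above) =====
theorem formal_name_spec : Claim_equal_formal_name := by
  unfold Claim_equal_formal_name Spec_formal_name
  intro name _
  rw [← String.toList_inj, pv_formal_name_toList, pvComp_eq_scan]
  simp [formal_name_alt]
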